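-- pv_equiv track=rewrite | github.com/Viktor26903/bioinf2_projekt | ciscenje.py | provjeri_susjede
-- ===== SOURCE A (Python) =====
-- def match(seq1, seq2, index1, index2, direction):
--     count = 0
--     if direction == "lijevo":
--         for i in range(index1, index2+1):
--             if seq1[i] == seq2[i]:
--                 count -= 1
--         for i in range(index1, index2+1):
--             if seq1[i] == seq2[i-1]:
--                 count += 1
--     else:
--         for i in range(index1, index2+1):
--             if seq1[i] == seq2[i]:
--                 count -= 1
--         for i in range(index1, index2+1):
--             if seq1[i] == seq2[i+1]:
--                 count += 1
--     return count
--
-- def provjeri_susjede(seq1, seq2, index1, index2):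
--     if index1 > 0 and index2 < min(len(seq1), len(seq2)) - 1:
--         if seq1[index1-1] == "-" and seq1[index2+1] != "-" and seq2[index1-1] != "-" and seq2[index2+1] == "-":
--             if match(seq1, seq2, index1, index2, "lijevo") >= 0:
--                 del seq1[index1 - 1]
--                 del seq2[index2 + 1]
--                 provjeri_susjede(seq1, seq2, index1-1, index2)
--         elif seq1[index1-1] != "-" and seq1[index2+1] == "-" and seq2[index1-1] == "-" and seq2[index2+1] != "-":
--             if match(seq1, seq2, index1, index2, "desno") >= 0:
--                 del seq1[index2 + 1]
--                 del seq2[index1 - 1]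
--                 provjeri_susjede(seq1, seq2, index1-1, index2)
--     return seq1, seq2, index2
-- ===== SOURCE B (Python) =====
-- def _score(seq1, seq2, lo, hi, shift):
--     total = 0
--     for i in range(lo, hi + 1):
--         if seq1[i] == seq2[i + shift]:
--             total += 1
--         if seq1[i] == seq2[i]:
--             total -= 1
--     return total
--
-- def provjeri_susjede(seq1, seq2, index1, index2):
--     i1 = index1
--     while i1 > 0 and index2 < min(len(seq1), len(seq2)) - 1:
--         pattern = (seq1[i1 - 1] == "-", seq1[index2 + 1] == "-",
--                    seq2[i1 - 1] == "-", seq2[index2 + 1] == "-")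
--         if pattern == (True, False, False, True):
--             if _score(seq1, seq2, i1, index2, -1) < 0:
--                 break
--             del seq1[i1 - 1]
--             del seq2[index2 + 1]
--         elif pattern == (False, True, True, False):
--             if _score(seq1, seq2, i1, index2, 1) < 0:
--                 break
--             del seq1[index2 + 1]
--             del seq2[i1 - 1]
--         else:
--             break
--         i1 -= 1
--     return seq1, seq2, index2
-- ===== Notes on version B (the rewrite author's own statement) =====
-- stated objective: simpler
-- what changed: Tail recursion becomes an explicit while loop, the two two-pass counting loops of match collapse into one single-pass signed score with a shift parameter, and the four '-' tests are dispatched on one boolean pattern tuple instead of two long elif conditions.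
import Mathlib
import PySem

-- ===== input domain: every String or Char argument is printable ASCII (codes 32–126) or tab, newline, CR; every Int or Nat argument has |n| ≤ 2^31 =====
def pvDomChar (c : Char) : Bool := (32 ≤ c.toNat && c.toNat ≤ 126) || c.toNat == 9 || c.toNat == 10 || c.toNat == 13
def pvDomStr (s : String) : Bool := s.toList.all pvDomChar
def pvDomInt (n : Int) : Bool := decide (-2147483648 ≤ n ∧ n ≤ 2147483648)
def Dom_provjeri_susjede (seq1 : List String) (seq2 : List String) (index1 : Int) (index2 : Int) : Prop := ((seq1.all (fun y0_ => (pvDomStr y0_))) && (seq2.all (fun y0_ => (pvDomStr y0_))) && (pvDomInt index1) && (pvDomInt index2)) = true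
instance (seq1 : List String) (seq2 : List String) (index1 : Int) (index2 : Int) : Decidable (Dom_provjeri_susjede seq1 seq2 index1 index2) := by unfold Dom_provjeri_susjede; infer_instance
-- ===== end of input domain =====

-- B replaces A's tail recursion by an explicit while loop, fuses match's two counting
-- passes into one signed single-pass score, and dispatches the two gap patterns on one
-- boolean tuple (objective: simpler).  Both Pythons mutate seq1/seq2 in place by the
-- same deletions; the equivalence proved here is about the RETURN value.

-- ===== PORT A =====
-- the helper 'match' of A (two counting passes over range(index1, index2+1))
def pyMatch (seq1 : List String) (seq2 : List String) (index1 : Int) (index2 : Int) (direction : String) : Int :=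
  if direction == "lijevo" then
    let count := (PySem.List.pyRange index1 (index2 + 1) 1).foldl
      (fun count i => if PySem.List.pyGetD seq1 i "" == PySem.List.pyGetD seq2 i "" then count - 1 else count) 0
    (PySem.List.pyRange index1 (index2 + 1) 1).foldl
      (fun count i => if PySem.List.pyGetD seq1 i "" == PySem.List.pyGetD seq2 (i - 1) "" then count + 1 else count) count
  else
    let count := (PySem.List.pyRange index1 (index2 + 1) 1).foldl
      (fun count i => if PySem.List.pyGetD seq1 i "" == PySem.List.pyGetD seq2 i "" then count - 1 else count) 0
    (PySem.List.pyRange index1 (index2 + 1) 1).foldl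
      (fun count i => if PySem.List.pyGetD seq1 i "" == PySem.List.pyGetD seq2 (i + 1) "" then count + 1 else count) count

-- recursion of A; 'del xs[k]' is ported as eraseIdx k.toNat, exact for 0 ≤ k < len
-- (guaranteed by Pre_ below); indexing via pyGetD, exact under Pre_.
def provjeri_susjede (seq1 : List String) (seq2 : List String) (index1 : Int) (index2 : Int) : List String × List String × Int :=
  if h : 0 < index1 ∧ index2 < min (seq1.length : Int) (seq2.length : Int) - 1 then
    if PySem.List.pyGetD seq1 (index1 - 1) "" == "-" && !(PySem.List.pyGetD seq1 (index2 + 1) "" == "-")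
       && !(PySem.List.pyGetD seq2 (index1 - 1) "" == "-") && PySem.List.pyGetD seq2 (index2 + 1) "" == "-" then
      if pyMatch seq1 seq2 index1 index2 "lijevo" ≥ 0 then
        let s1 := seq1.eraseIdx (index1 - 1).toNat
        let s2 := seq2.eraseIdx (index2 + 1).toNat
        let r := provjeri_susjede s1 s2 (index1 - 1) index2
        (r.1, r.2.1, index2)
      else (seq1, seq2, index2)
    else if !(PySem.List.pyGetD seq1 (index1 - 1) "" == "-") && PySem.List.pyGetD seq1 (index2 + 1) "" == "-"
       && PySem.List.pyGetD seq2 (index1 - 1) "" == "-" && !(PySem.List.pyGetD seq2 (index2 + 1) "" == "-") then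
      if pyMatch seq1 seq2 index1 index2 "desno" ≥ 0 then
        let s1 := seq1.eraseIdx (index2 + 1).toNat
        let s2 := seq2.eraseIdx (index1 - 1).toNat
        let r := provjeri_susjede s1 s2 (index1 - 1) index2
        (r.1, r.2.1, index2)
      else (seq1, seq2, index2)
    else (seq1, seq2, index2)
  else (seq1, seq2, index2)
termination_by index1.toNat
decreasing_by all_goals omega

-- ===== PORT B =====
-- B's helper _score: ONE pass, +1 for a shifted match, -1 for an aligned match
def scoreAlt (seq1 : List String) (seq2 : List String) (lo : Int) (hi : Int) (shift : Int) : Int :=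
  (PySem.List.pyRange lo (hi + 1) 1).foldl
    (fun total i =>
      let t := if PySem.List.pyGetD seq1 i "" == PySem.List.pyGetD seq2 (i + shift) "" then total + 1 else total
      if PySem.List.pyGetD seq1 i "" == PySem.List.pyGetD seq2 i "" then t - 1 else t) 0

-- B's while loop, state (seq1, seq2, i1); break = return the current lists
def loopAlt (seq1 : List String) (seq2 : List String) (i1 : Int) (index2 : Int) : List String × List String :=
  if h : 0 < i1 ∧ index2 < min (seq1.length : Int) (seq2.length : Int) - 1 then
    let pattern := (PySem.List.pyGetD seq1 (i1 - 1) "" == "-", PySem.List.pyGetD seq1 (index2 + 1) "" == "-",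
                    PySem.List.pyGetD seq2 (i1 - 1) "" == "-", PySem.List.pyGetD seq2 (index2 + 1) "" == "-")
    if pattern = (true, false, false, true) then
      if scoreAlt seq1 seq2 i1 index2 (-1) < 0 then (seq1, seq2)
      else loopAlt (seq1.eraseIdx (i1 - 1).toNat) (seq2.eraseIdx (index2 + 1).toNat) (i1 - 1) index2
    else if pattern = (false, true, true, false) then
      if scoreAlt seq1 seq2 i1 index2 1 < 0 then (seq1, seq2)
      else loopAlt (seq1.eraseIdx (index2 + 1).toNat) (seq2.eraseIdx (i1 - 1).toNat) (i1 - 1) index2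
    else (seq1, seq2)
  else (seq1, seq2)
termination_by i1.toNat
decreasing_by all_goals omega

def provjeri_susjede_alt (seq1 : List String) (seq2 : List String) (index1 : Int) (index2 : Int) : List String × List String × Int :=
  let r := loopAlt seq1 seq2 index1 index2
  (r.1, r.2, index2)

-- ===== PRECONDITION & SPEC =====
-- Pre_ excludes calls whose guard fires with index1 beyond a list length (A raises
-- IndexError, and so does B) and those with index2 ≤ -2, where the flanking accesses go
-- through Python negative-index wraparound — an accidental corner no caller of this
-- alignment-trimming routine reaches (index positions are nonnegative), so it is not claimed.
def Pre_provjeri_susjede (seq1 : List String) (seq2 : List String) (index1 : Int) (index2 : Int) : Prop :=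
  (0 < index1 ∧ index2 < min (seq1.length : Int) (seq2.length : Int) - 1) →
    (index1 ≤ seq1.length ∧ index1 ≤ seq2.length ∧ -1 ≤ index2)
instance (seq1 : List String) (seq2 : List String) (index1 : Int) (index2 : Int) : Decidable (Pre_provjeri_susjede seq1 seq2 index1 index2) := by unfold Pre_provjeri_susjede; infer_instance

def pvWitness_provjeri_susjede : List String × List String × Int × Int := (["-", "a"], ["a", "-"], 1, 0)

def Spec_provjeri_susjede (seq1 : List String) (seq2 : List String) (index1 : Int) (index2 : Int) (out : List String × List String × Int) : Prop := out = provjeri_susjede_alt seq1 seq2 index1 index2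
instance (seq1 : List String) (seq2 : List String) (index1 : Int) (index2 : Int) (out : List String × List String × Int) : Decidable (Spec_provjeri_susjede seq1 seq2 index1 index2 out) := by unfold Spec_provjeri_susjede; infer_instance

-- ===== CLAIM (what is proved, stated in full; the proofs are below) =====
def Claim_equal_provjeri_susjede : Prop := ∀ (seq1 : List String) (seq2 : List String) (index1 : Int) (index2 : Int), Dom_provjeri_susjede seq1 seq2 index1 index2 → Pre_provjeri_susjede seq1 seq2 index1 index2 → Spec_provjeri_susjede seq1 seq2 index1 index2 (provjeri_susjede seq1 seq2 index1 index2)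

-- ===== LEMMAS AND PROOFS =====

lemma sum_map_add_int {α : Type} (l : List α) (f g : α → Int) :
    (l.map (fun x => f x + g x)).sum = (l.map f).sum + (l.map g).sum := by
  induction l with
  | nil => simp
  | cons x xs ih => simp [ih]; ring

lemma evalP (l : List Int) (p : Int → Bool) (k : Int) :
    l.foldl (fun (c : Int) i => if p i then c - 1 else c) k
      = k + (l.map (fun i => if p i then (-1 : Int) else 0)).sum := by
  induction l generalizing k with
  | nil => simp
  | cons x xs ih =>
    simp only [List.foldl_cons, List.map_cons, List.sum_cons]
    rw [ih]
    split <;> ring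

lemma evalQ (l : List Int) (q : Int → Bool) (k : Int) :
    l.foldl (fun (c : Int) i => if q i then c + 1 else c) k
      = k + (l.map (fun i => if q i then (1 : Int) else 0)).sum := by
  induction l generalizing k with
  | nil => simp
  | cons x xs ih =>
    simp only [List.foldl_cons, List.map_cons, List.sum_cons]
    rw [ih]
    split <;> ring

lemma evalC (l : List Int) (p q : Int → Bool) (k : Int) :
    l.foldl (fun (c : Int) i => if p i then (if q i then c + 1 else c) - 1 else (if q i then c + 1 else c)) k
      = k + (l.map (fun i => (if q i then (1 : Int) else 0) + (if p i then (-1 : Int) else 0))).sum := by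
  induction l generalizing k with
  | nil => simp
  | cons x xs ih =>
    simp only [List.foldl_cons, List.map_cons, List.sum_cons]
    rw [ih]
    split <;> split <;> ring

-- the two counting passes of A's match equal one signed pass of B's _score
lemma two_pass (l : List Int) (p q : Int → Bool) :
    l.foldl (fun (c : Int) i => if q i then c + 1 else c)
        (l.foldl (fun (c : Int) i => if p i then c - 1 else c) (0 : Int))
      = l.foldl (fun (c : Int) i => if p i then (if q i then c + 1 else c) - 1 else (if q i then c + 1 else c)) (0 : Int) := by
  rw [evalP l p 0, evalQ l q (0 + (l.map (fun i => if p i then (-1 : Int) else 0)).sum),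
      evalC l p q 0,
      sum_map_add_int l (fun i => if q i then (1 : Int) else 0) (fun i => if p i then (-1 : Int) else 0)]
  ring

lemma match_lijevo_eq (seq1 seq2 : List String) (i1 i2 : Int) :
    pyMatch seq1 seq2 i1 i2 "lijevo" = scoreAlt seq1 seq2 i1 i2 (-1) := by
  unfold pyMatch scoreAlt
  rw [if_pos (by decide)]
  simp only [show ∀ i : Int, i + (-1) = i - 1 from fun i => by ring]
  exact two_pass (PySem.List.pyRange i1 (i2 + 1) 1)
    (fun i => PySem.List.pyGetD seq1 i "" == PySem.List.pyGetD seq2 i "")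
    (fun i => PySem.List.pyGetD seq1 i "" == PySem.List.pyGetD seq2 (i - 1) "")

lemma match_desno_eq (seq1 seq2 : List String) (i1 i2 : Int) :
    pyMatch seq1 seq2 i1 i2 "desno" = scoreAlt seq1 seq2 i1 i2 1 := by
  unfold pyMatch scoreAlt
  rw [if_neg (by decide)]
  exact two_pass (PySem.List.pyRange i1 (i2 + 1) 1)
    (fun i => PySem.List.pyGetD seq1 i "" == PySem.List.pyGetD seq2 i "")
    (fun i => PySem.List.pyGetD seq1 i "" == PySem.List.pyGetD seq2 (i + 1) "")

-- the main induction: A's recursion computes B's loop (plus the untouched index2)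
lemma provjeri_eq_loop (seq1 seq2 : List String) (i1 i2 : Int) :
    provjeri_susjede seq1 seq2 i1 i2
      = ((loopAlt seq1 seq2 i1 i2).1, (loopAlt seq1 seq2 i1 i2).2, i2) := by
  rw [provjeri_susjede, loopAlt]
  split
  · rename_i h
    cases hA : PySem.List.pyGetD seq1 (i1 - 1) "" == "-" <;>
    cases hB : PySem.List.pyGetD seq1 (i2 + 1) "" == "-" <;>
    cases hC : PySem.List.pyGetD seq2 (i1 - 1) "" == "-" <;>
    cases hD : PySem.List.pyGetD seq2 (i2 + 1) "" == "-" <;>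
      simp only [hA, hB, hC, hD, Bool.not_true, Bool.not_false, Bool.and_self,
        Bool.true_and, Bool.false_and, Bool.and_true, Bool.and_false,
        Prod.mk.injEq, reduceCtorEq, and_self, and_false, false_and, and_true, true_and,
        if_true, if_false] <;>
      first
        | rfl
        | (rw [match_lijevo_eq]
           by_cases hs : scoreAlt seq1 seq2 i1 i2 (-1) < 0
           · rw [if_neg (show ¬ scoreAlt seq1 seq2 i1 i2 (-1) ≥ 0 by omega), if_pos hs]
           · rw [if_pos (show scoreAlt seq1 seq2 i1 i2 (-1) ≥ 0 by omega), if_neg hs,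
                 provjeri_eq_loop])
        | (rw [match_desno_eq]
           by_cases hs : scoreAlt seq1 seq2 i1 i2 1 < 0
           · rw [if_neg (show ¬ scoreAlt seq1 seq2 i1 i2 1 ≥ 0 by omega), if_pos hs]
           · rw [if_pos (show scoreAlt seq1 seq2 i1 i2 1 ≥ 0 by omega), if_neg hs,
                 provjeri_eq_loop])
  · rfl
termination_by i1.toNat
decreasing_by all_goals omega

-- ===== VERDICT (by name: the statement is the Claim_ definition above) =====
theorem provjeri_susjede_spec : Claim_equal_provjeri_susjede := by
  intro seq1 seq2 i1 i2 _ _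
  unfold Spec_provjeri_susjede provjeri_susjede_alt
  exact provjeri_eq_loop seq1 seq2 i1 i2
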